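-- pv_equiv track=rewrite | github.com/supersunking123-stupid/auto_waveform_debugger | agent_debug_automation/virtual_signals.py | _dependent_signals
-- ===== SOURCE A (Python) =====
-- from typing import Any, Dict, Iterator, List, Optional, Sequence, Tuple
--
-- def _dependent_signals(
--     signal_name: str,
--     created_signals: Dict[str, Dict[str, Any]],
-- ) -> List[str]:
--     """Return all created signals that transitively depend on *signal_name*."""
--     dependents: set = set()
--     frontier = [signal_name]
--     while frontier:
--         current = frontier.pop()
--         for name, info in created_signals.items():
--             if name in dependents or name == signal_name:
--                 continue
--             if current in info.get("dependencies", []):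
--                 dependents.add(name)
--                 frontier.append(name)
--     return sorted(dependents)
-- ===== SOURCE B (Python) =====
-- def _dependent_signals(signal_name, created_signals):
--     """Return all created signals that transitively depend on *signal_name*."""
--     rev = {}
--     for name, info in created_signals.items():
--         if name == signal_name:
--             continue
--         for dep in info.get("dependencies", []):
--             rev.setdefault(dep, []).append(name)
--     seen = set()
--     stack = [signal_name]
--     while stack:
--         current = stack.pop()
--         for name in rev.get(current, []):
--             if name not in seen:
--                 seen.add(name)
--                 stack.append(name)
--     return sorted(seen)
-- ===== Notes on version B (the rewrite author's own statement) =====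
-- stated objective: alternative
-- what changed: B builds a reverse-dependency adjacency map once and runs a single DFS over it, instead of A's rescanning every signal's dependency list on each frontier pop.
import Mathlib
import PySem

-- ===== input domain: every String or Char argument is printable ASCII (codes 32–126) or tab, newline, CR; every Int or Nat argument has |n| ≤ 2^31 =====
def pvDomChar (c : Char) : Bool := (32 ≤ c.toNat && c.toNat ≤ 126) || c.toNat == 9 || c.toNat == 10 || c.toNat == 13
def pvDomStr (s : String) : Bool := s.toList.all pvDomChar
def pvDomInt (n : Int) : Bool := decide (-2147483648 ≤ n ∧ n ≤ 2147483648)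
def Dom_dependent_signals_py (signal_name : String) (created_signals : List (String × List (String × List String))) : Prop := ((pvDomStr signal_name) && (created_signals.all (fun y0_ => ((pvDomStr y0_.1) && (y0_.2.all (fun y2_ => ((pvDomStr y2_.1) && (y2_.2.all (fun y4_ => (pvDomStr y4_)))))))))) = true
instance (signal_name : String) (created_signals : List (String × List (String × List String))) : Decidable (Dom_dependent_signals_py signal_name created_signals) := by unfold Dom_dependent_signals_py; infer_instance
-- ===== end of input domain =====

-- B replaces A's repeated full scans of all signals (one per frontier pop) by a reverse-dependency
-- adjacency map built once, followed by a single DFS over that map; same return value.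

-- info.get("dependencies", [])
def getDeps (info : List (String × List String)) : List String :=
  PySem.Dict.getD (PySem.Dict.mk info) "dependencies" []

-- ===== PORT A =====
-- the inner 'for name, info in created_signals.items():' body of A's while loop
def pyA_scan (signal_name current : String) (created_signals : List (String × List (String × List String)))
    (st : PySem.Set String × List String) : PySem.Set String × List String :=
  created_signals.foldl (fun st p =>
    if PySem.Set.contains st.1 p.1 || p.1 == signal_name then st
    else if current ∈ getDeps p.2 then (PySem.Set.add st.1 p.1, st.2 ++ [p.1]) else st) st

-- 'while frontier:' — fuel-guarded (fuel len+1 provably suffices: each push adds a fresh key to dependents)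
def pyA_loop (signal_name : String) (created_signals : List (String × List (String × List String))) :
    Nat → PySem.Set String → List String → PySem.Set String
  | 0, dependents, _ => dependents
  | fuel + 1, dependents, frontier =>
    match frontier.getLast? with
    | none => dependents
    | some current =>
      let st := pyA_scan signal_name current created_signals (dependents, frontier.dropLast)
      pyA_loop signal_name created_signals fuel st.1 st.2

def dependent_signals_py (signal_name : String) (created_signals : List (String × List (String × List String))) : List String :=
  PySem.List.sorted (pyA_loop signal_name created_signals (created_signals.length + 1) PySem.Set.empty [signal_name]) (fun x => x) false

-- ===== PORT B =====
-- rev[dep] = all signals (≠ signal_name) having dep in their dependencies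
def pyB_rev (signal_name : String) (created_signals : List (String × List (String × List String))) :
    PySem.Dict String (List String) :=
  created_signals.foldl (fun rev p =>
    if p.1 == signal_name then rev
    else (getDeps p.2).foldl (fun rev dep => rev.modify dep [] (· ++ [p.1])) rev) PySem.Dict.empty

-- DFS over the precomputed reverse map (fuel-guarded; fuel len+1 provably suffices)
def pyB_loop (rev : PySem.Dict String (List String)) :
    Nat → PySem.Set String → List String → PySem.Set String
  | 0, seen, _ => seen
  | fuel + 1, seen, stack =>
    match stack.getLast? with
    | none => seen
    | some current =>
      let st := (rev.getD current []).foldl (fun (st : PySem.Set String × List String) name =>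
        if PySem.Set.contains st.1 name then st
        else (PySem.Set.add st.1 name, st.2 ++ [name])) (seen, stack.dropLast)
      pyB_loop rev fuel st.1 st.2

def dependent_signals_py_alt (signal_name : String) (created_signals : List (String × List (String × List String))) : List String :=
  PySem.List.sorted (pyB_loop (pyB_rev signal_name created_signals) (created_signals.length + 1) PySem.Set.empty [signal_name]) (fun x => x) false

-- ===== PRECONDITION & SPEC =====
def Spec_dependent_signals_py (signal_name : String) (created_signals : List (String × List (String × List String))) (out : List String) : Prop := out = dependent_signals_py_alt signal_name created_signals
instance (signal_name : String) (created_signals : List (String × List (String × List String))) (out : List String) : Decidable (Spec_dependent_signals_py signal_name created_signals out) := by unfold Spec_dependent_signals_py; infer_instance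

-- ===== CLAIM (what is proved, stated in full; the proofs are below) =====
def Claim_equal_dependent_signals_py : Prop := ∀ (signal_name : String) (created_signals : List (String × List (String × List String))), Dom_dependent_signals_py signal_name created_signals → Spec_dependent_signals_py signal_name created_signals (dependent_signals_py signal_name created_signals)

-- ===== LEMMAS AND PROOFS =====

-- 'v depends (directly) on c': some entry named v (≠ signal_name) lists c among its dependencies
def EdgeP (signal_name : String) (created_signals : List (String × List (String × List String))) (c v : String) : Prop :=
  v ≠ signal_name ∧ ∃ p ∈ created_signals, p.1 = v ∧ c ∈ getDeps p.2

-- transitive dependence on signal_name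
inductive ReachR (signal_name : String) (E : String → String → Prop) : String → Prop
  | base (v : String) : E signal_name v → ReachR signal_name E v
  | step (c v : String) : ReachR signal_name E c → E c v → ReachR signal_name E v

-- abstract worklist loop; both ports' loops are instances
def wlLoop (body : List String → String → List String → List String × List String) :
    Nat → List String → List String → List String
  | 0, deps, _ => deps
  | fuel + 1, deps, front =>
    match front.getLast? with
    | none => deps
    | some current =>
      let st := body deps current front.dropLast
      wlLoop body fuel st.1 st.2

lemma reach_closed (sig : String) (E : String → String → Prop) (S : List String)
    (h : ∀ c v, E c v → (c = sig ∨ c ∈ S) → v ∈ S) :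
    ∀ v, ReachR sig E v → v ∈ S := by
  intro v hv
  induction hv with
  | base v he => exact h sig v he (Or.inl rfl)
  | step c v _ he ih => exact h c v he (Or.inr ih)

lemma wl_master (sig : String) (E : String → String → Prop) (K : List String) (hK : K.Nodup)
    (hEK : ∀ c v, E c v → v ∈ K)
    (body : List String → String → List String → List String × List String)
    (hbody : ∀ deps current rest, deps.Nodup →
      ∃ add, body deps current rest = (deps ++ add, rest ++ add) ∧ (deps ++ add).Nodup ∧
        ∀ v, v ∈ add ↔ (v ∉ deps ∧ E current v)) :
    ∀ (fuel : Nat) (deps front : List String), deps.Nodup →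
      front.length + (K.filter (fun k => decide (k ∉ deps))).length ≤ fuel →
      (∀ v ∈ deps, ReachR sig E v) →
      (∀ c ∈ front, c = sig ∨ ReachR sig E c) →
      (∀ c v, E c v → (c = sig ∨ c ∈ deps) → c ∉ front → v ∈ deps) →
      (wlLoop body fuel deps front).Nodup ∧
        ∀ v, (v ∈ wlLoop body fuel deps front ↔ (v ∈ deps ∨ ReachR sig E v)) := by
  intro fuel
  induction fuel with
  | zero =>
    intro deps front hnd hbud hsd _ hci
    have hfe : front = [] := List.length_eq_zero_iff.mp (by omega)
    subst hfe
    have hcl : ∀ c v, E c v → (c = sig ∨ c ∈ deps) → v ∈ deps :=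
      fun c v he hc => hci c v he hc (by simp)
    refine ⟨hnd, fun v => ⟨fun h => Or.inl h, ?_⟩⟩
    rintro (h | h)
    · exact h
    · exact reach_closed sig E deps hcl v h
  | succ n ih =>
    intro deps front hnd hbud hsd hsf hci
    cases hfl : front.getLast? with
    | none =>
      have hfe : front = [] := List.getLast?_eq_none_iff.mp hfl
      subst hfe
      have hcl : ∀ c v, E c v → (c = sig ∨ c ∈ deps) → v ∈ deps :=
        fun c v he hc => hci c v he hc (by simp)
      refine ⟨by simp [wlLoop, hnd], fun v => ?_⟩
      simp only [wlLoop]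
      constructor
      · exact fun h => Or.inl h
      · rintro (h | h)
        · exact h
        · exact reach_closed sig E deps hcl v h
    | some current =>
      obtain ⟨add, hb1, hb2, hb3⟩ := hbody deps current front.dropLast hnd
      have hunf : wlLoop body (n + 1) deps front = wlLoop body n (deps ++ add) (front.dropLast ++ add) := by
        simp [wlLoop, hfl, hb1]
      have hfr : front.dropLast ++ [current] = front := List.dropLast_append_getLast? current (by rw [hfl]; exact rfl)
      have hcur : current ∈ front := by
        rw [← hfr]; exact List.mem_append_right _ (List.mem_singleton_self current)
      have hsc : current = sig ∨ ReachR sig E current := hsf current hcur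
      have haddR : ∀ v ∈ add, ReachR sig E v := by
        intro v hv
        obtain ⟨_, he⟩ := (hb3 v).mp hv
        rcases hsc with h | h
        · exact ReachR.base v (h ▸ he)
        · exact ReachR.step current v h he
      have haddnd : add.Nodup := hb2.of_append_right
      have haddK : ∀ v ∈ add, v ∈ K := fun v hv => hEK current v ((hb3 v).mp hv).2
      have haddnd' : ∀ v ∈ add, v ∉ deps := fun v hv => ((hb3 v).mp hv).1
      -- the fresh keys added leave the budget invariant intact
      have hkey : (K.filter (fun k => decide (k ∉ deps ++ add))).length + add.length =
          (K.filter (fun k => decide (k ∉ deps))).length := by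
        have hsplit : K.filter (fun k => decide (k ∉ deps ++ add)) =
            (K.filter (fun k => decide (k ∉ deps))).filter (fun k => decide (k ∉ add)) := by
          rw [List.filter_filter]
          apply List.filter_congr
          intro k _
          simp [List.mem_append, not_or, Bool.and_comm]
        have hpart := List.length_eq_length_filter_add
          (l := K.filter (fun k => decide (k ∉ deps))) (fun k => decide (k ∈ add))
        have hnot : (K.filter (fun k => decide (k ∉ deps))).filter (fun k => !(decide (k ∈ add))) =
            (K.filter (fun k => decide (k ∉ deps))).filter (fun k => decide (k ∉ add)) := by
          apply List.filter_congr
          intro k _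
          simp
        have hin : ((K.filter (fun k => decide (k ∉ deps))).filter (fun k => decide (k ∈ add))).length =
            add.length := by
          have hperm : ((K.filter (fun k => decide (k ∉ deps))).filter
              (fun k => decide (k ∈ add))).Perm add := by
            refine (List.perm_ext_iff_of_nodup (List.Nodup.filter _ (List.Nodup.filter _ hK)) haddnd).mpr ?_
            intro a
            simp only [List.mem_filter, decide_eq_true_eq]
            constructor
            · exact fun h => h.2
            · exact fun h => ⟨⟨haddK a h, haddnd' a h⟩, h⟩
          exact hperm.length_eq
        rw [hsplit, ← hnot]
        omega
      have hflen : front.length = front.dropLast.length + 1 := by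
        rw [← hfr]; simp
      obtain ⟨hndR, hmemR⟩ := ih (deps ++ add) (front.dropLast ++ add) hb2
        (by rw [List.length_append]; omega)
        (by
          intro v hv
          rcases List.mem_append.mp hv with h | h
          · exact hsd v h
          · exact haddR v h)
        (by
          intro c hc
          rcases List.mem_append.mp hc with h | h
          · exact hsf c (List.mem_of_mem_dropLast h)
          · exact Or.inr (haddR c h))
        (by
          intro c v he hc hcf
          by_cases hca : c ∈ add
          · exact absurd (List.mem_append_right _ hca) hcf
          have hc' : c = sig ∨ c ∈ deps := by
            rcases hc with h | h
            · exact Or.inl h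
            · rcases List.mem_append.mp h with h' | h'
              · exact Or.inr h'
              · exact absurd h' hca
          by_cases hcfr : c ∈ front
          · have hcc : c = current := by
              rw [← hfr] at hcfr
              rcases List.mem_append.mp hcfr with h | h
              · exact absurd (List.mem_append_left _ h) hcf
              · exact List.mem_singleton.mp h
            subst hcc
            by_cases hvd : v ∈ deps
            · exact List.mem_append_left _ hvd
            · exact List.mem_append_right _ ((hb3 v).mpr ⟨hvd, he⟩)
          · exact List.mem_append_left _ (hci c v he hc' hcfr))
      rw [hunf]
      refine ⟨hndR, fun v => ?_⟩
      rw [hmemR v]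
      constructor
      · rintro (h | h)
        · rcases List.mem_append.mp h with h' | h'
          · exact Or.inl h'
          · exact Or.inr (haddR v h')
        · exact Or.inr h
      · rintro (h | h)
        · exact Or.inl (List.mem_append_left _ h)
        · exact Or.inr h

-- ----- port A is an instance -----

lemma scanA_spec (sig cur : String) :
    ∀ (l : List (String × List (String × List String))) (deps front : List String), deps.Nodup →
      ∃ add, (l.foldl (fun st p =>
          if PySem.Set.contains st.1 p.1 || p.1 == sig then st
          else if cur ∈ getDeps p.2 then (PySem.Set.add st.1 p.1, st.2 ++ [p.1]) else st)
          ((deps, front) : PySem.Set String × List String)) = (deps ++ add, front ++ add) ∧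
        (deps ++ add).Nodup ∧
        ∀ v, v ∈ add ↔ (v ∉ deps ∧ v ≠ sig ∧ ∃ p ∈ l, p.1 = v ∧ cur ∈ getDeps p.2) := by
  intro l
  induction l with
  | nil => intro deps front h; exact ⟨[], by simp [h]⟩
  | cons q l ih =>
    intro deps front hnd
    set f := (fun (st : PySem.Set String × List String) (p : String × List (String × List String)) =>
      if PySem.Set.contains st.1 p.1 || p.1 == sig then st
      else if cur ∈ getDeps p.2 then (PySem.Set.add st.1 p.1, st.2 ++ [p.1]) else st) with hf
    by_cases hskip : q.1 ∈ deps ∨ q.1 = sig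
    · have hstep : f (deps, front) q = (deps, front) := by
        rcases hskip with h | h
        · simp [hf, PySem.Set.contains, h]
        · simp [hf, h]
      obtain ⟨add, h1, h2, h3⟩ := ih deps front hnd
      refine ⟨add, by rw [List.foldl_cons, hstep]; exact h1, h2, ?_⟩
      intro v
      rw [h3 v]
      constructor
      · rintro ⟨hv1, hv2, p, hp, hpv⟩; exact ⟨hv1, hv2, p, List.mem_cons_of_mem _ hp, hpv⟩
      · rintro ⟨hv1, hv2, p, hp, rfl, hpc⟩
        rcases List.mem_cons.mp hp with rfl | hp'
        · rcases hskip with h | h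
          · exact absurd h hv1
          · exact absurd h hv2
        · exact ⟨hv1, hv2, p, hp', rfl, hpc⟩
    · rw [not_or] at hskip
      by_cases hdep : cur ∈ getDeps q.2
      · have hstep : f (deps, front) q = (deps ++ [q.1], front ++ [q.1]) := by
          simp [hf, PySem.Set.contains, hskip.1, hskip.2, hdep, PySem.Set.add]
        have hnd' : (deps ++ [q.1]).Nodup := by
          refine List.Nodup.append hnd (List.nodup_singleton q.1) ?_
          intro a ha hb
          simp only [List.mem_singleton] at hb
          exact hskip.1 (hb ▸ ha)
        obtain ⟨add, h1, h2, h3⟩ := ih (deps ++ [q.1]) (front ++ [q.1]) hnd'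
        refine ⟨q.1 :: add, ?_, ?_, ?_⟩
        · rw [List.foldl_cons, hstep, h1]
          simp
        · simpa using h2
        · intro v
          simp only [List.mem_cons, h3 v, List.mem_append]
          constructor
          · rintro (rfl | ⟨hv1, hv2, p, hp, hpv⟩)
            · exact ⟨hskip.1, hskip.2, q, Or.inl rfl, rfl, hdep⟩
            · exact ⟨fun hv => hv1 (Or.inl hv), hv2, p, Or.inr hp, hpv⟩
          · rintro ⟨hv1, hv2, p, hp, rfl, hpc⟩
            rcases hp with rfl | hp'
            · exact Or.inl rfl
            · by_cases hvq : p.1 = q.1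
              · exact Or.inl hvq
              · exact Or.inr ⟨by simp [hv1, hvq], hv2, p, hp', rfl, hpc⟩
      · have hstep : f (deps, front) q = (deps, front) := by
          simp [hf, PySem.Set.contains, hskip.1, hskip.2, hdep]
        obtain ⟨add, h1, h2, h3⟩ := ih deps front hnd
        refine ⟨add, by rw [List.foldl_cons, hstep]; exact h1, h2, ?_⟩
        intro v
        rw [h3 v]
        constructor
        · rintro ⟨hv1, hv2, p, hp, hpv⟩; exact ⟨hv1, hv2, p, List.mem_cons_of_mem _ hp, hpv⟩
        · rintro ⟨hv1, hv2, p, hp, rfl, hpc⟩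
          rcases List.mem_cons.mp hp with rfl | hp'
          · exact absurd hpc hdep
          · exact ⟨hv1, hv2, p, hp', rfl, hpc⟩

lemma pyA_loop_eq (sig : String) (cs : List (String × List (String × List String))) :
    ∀ fuel deps front, pyA_loop sig cs fuel deps front =
      wlLoop (fun deps current rest => pyA_scan sig current cs (deps, rest)) fuel deps front := by
  intro fuel
  induction fuel with
  | zero => intro deps front; rfl
  | succ n ih =>
    intro deps front
    simp only [pyA_loop, wlLoop]
    cases front.getLast? with
    | none => rfl
    | some current => exact ih _ _

-- ----- port B is an instance -----

lemma revB_getD_mem (sig : String) (cs : List (String × List (String × List String))) (c x : String) :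
    x ∈ (pyB_rev sig cs).getD c [] ↔ EdgeP sig cs c x := by
  have inner : ∀ (ds : List String) (nm : String) (d : PySem.Dict String (List String)),
      x ∈ (ds.foldl (fun d dep => d.modify dep [] (· ++ [nm])) d).getD c [] ↔
        (x ∈ d.getD c [] ∨ (x = nm ∧ c ∈ ds)) := by
    intro ds nm d
    have hmap : ds.foldl (fun d dep => d.modify dep [] (· ++ [nm])) d =
        (ds.map (fun dep => (dep, nm))).foldl (fun d p => d.modify p.1 [] (· ++ [p.2])) d := by
      rw [List.foldl_map]
    rw [hmap, PySem.Dict.getD_foldl_modify_append]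
    simp only [List.mem_append, List.mem_map, List.mem_filter, List.filter_map, List.map_map]
    constructor
    · rintro (h | h)
      · exact Or.inl h
      · simp only [Function.comp, beq_iff_eq] at h
        obtain ⟨dep, ⟨hdep, hdc⟩, hx⟩ := h
        exact Or.inr ⟨hx.symm, hdc ▸ hdep⟩
    · rintro (h | ⟨rfl, hc⟩)
      · exact Or.inl h
      · refine Or.inr ?_
        simp only [Function.comp, beq_iff_eq]
        exact ⟨c, ⟨hc, rfl⟩, trivial⟩
  have aux : ∀ (l : List (String × List (String × List String))) (d : PySem.Dict String (List String)),
      x ∈ (l.foldl (fun rev p =>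
          if p.1 == sig then rev
          else (getDeps p.2).foldl (fun rev dep => rev.modify dep [] (· ++ [p.1])) rev) d).getD c [] ↔
        (x ∈ d.getD c [] ∨ (x ≠ sig ∧ ∃ p ∈ l, p.1 = x ∧ c ∈ getDeps p.2)) := by
    intro l
    set f := (fun (rev : PySem.Dict String (List String)) (p : String × List (String × List String)) =>
      if p.1 == sig then rev
      else (getDeps p.2).foldl (fun rev dep => rev.modify dep [] (· ++ [p.1])) rev) with hf
    induction l with
    | nil => intro d; simp
    | cons q l ih =>
      intro d
      by_cases hq : q.1 = sig
      · have hstep : f d q = d := by simp [hf, hq]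
        rw [List.foldl_cons, hstep, ih d]
        constructor
        · rintro (h | ⟨h1, p, hp, hpv⟩)
          · exact Or.inl h
          · exact Or.inr ⟨h1, p, List.mem_cons_of_mem _ hp, hpv⟩
        · rintro (h | ⟨h1, p, hp, rfl, hpc⟩)
          · exact Or.inl h
          · rcases List.mem_cons.mp hp with rfl | hp'
            · exact absurd hq h1
            · exact Or.inr ⟨h1, p, hp', rfl, hpc⟩
      · have hstep : f d q = (getDeps q.2).foldl (fun rev dep => rev.modify dep [] (· ++ [q.1])) d := by
          simp [hf, hq]
        rw [List.foldl_cons, hstep, ih, inner (getDeps q.2) q.1 d]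
        constructor
        · rintro ((h | ⟨rfl, hc⟩) | ⟨h1, p, hp, hpv⟩)
          · exact Or.inl h
          · exact Or.inr ⟨hq, q, List.mem_cons_self .., rfl, hc⟩
          · exact Or.inr ⟨h1, p, List.mem_cons_of_mem _ hp, hpv⟩
        · rintro (h | ⟨h1, p, hp, rfl, hpc⟩)
          · exact Or.inl (Or.inl h)
          · rcases List.mem_cons.mp hp with rfl | hp'
            · exact Or.inl (Or.inr ⟨rfl, hpc⟩)
            · exact Or.inr ⟨h1, p, hp', rfl, hpc⟩
  rw [pyB_rev, aux]
  simp [EdgeP, PySem.Dict.getD_empty]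

lemma scanB_spec :
    ∀ (l : List String) (seen stack : List String), seen.Nodup →
      ∃ add, (l.foldl (fun (st : PySem.Set String × List String) name =>
          if PySem.Set.contains st.1 name then st
          else (PySem.Set.add st.1 name, st.2 ++ [name])) (seen, stack)) = (seen ++ add, stack ++ add) ∧
        (seen ++ add).Nodup ∧
        ∀ v, v ∈ add ↔ (v ∉ seen ∧ v ∈ l) := by
  intro l
  induction l with
  | nil => intro seen stack h; exact ⟨[], by simp [h]⟩
  | cons n l ih =>
    intro seen stack hnd
    by_cases hc : n ∈ seen
    · obtain ⟨add, h1, h2, h3⟩ := ih seen stack hnd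
      refine ⟨add, ?_, h2, ?_⟩
      · simpa [List.foldl_cons, PySem.Set.contains, hc] using h1
      · intro v
        rw [h3 v]
        constructor
        · rintro ⟨hv1, hv2⟩; exact ⟨hv1, List.mem_cons_of_mem _ hv2⟩
        · rintro ⟨hv1, hv2⟩
          rcases List.mem_cons.mp hv2 with h | h
          · exact absurd (h ▸ hc) hv1
          · exact ⟨hv1, h⟩
    · have hnd' : (seen ++ [n]).Nodup := by
        refine List.Nodup.append hnd (List.nodup_singleton n) ?_
        intro a ha hb
        simp only [List.mem_singleton] at hb
        exact hc (hb ▸ ha)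
      obtain ⟨add, h1, h2, h3⟩ := ih (seen ++ [n]) (stack ++ [n]) hnd'
      refine ⟨n :: add, ?_, ?_, ?_⟩
      · have : (List.foldl (fun (st : PySem.Set String × List String) name =>
            if PySem.Set.contains st.1 name then st
            else (PySem.Set.add st.1 name, st.2 ++ [name])) (seen, stack) (n :: l)) =
            (List.foldl (fun (st : PySem.Set String × List String) name =>
            if PySem.Set.contains st.1 name then st
            else (PySem.Set.add st.1 name, st.2 ++ [name])) (seen ++ [n], stack ++ [n]) l) := by
          simp [List.foldl_cons, PySem.Set.contains, hc]
        rw [this, h1]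
        simp
      · simpa using h2
      · intro v
        simp only [List.mem_cons, h3 v, List.mem_append]
        constructor
        · rintro (rfl | ⟨hv1, hv2⟩)
          · exact ⟨hc, Or.inl rfl⟩
          · exact ⟨fun hv => hv1 (Or.inl hv), Or.inr hv2⟩
        · rintro ⟨hv1, rfl | hv2⟩
          · exact Or.inl rfl
          · by_cases hvn : v = n
            · exact Or.inl hvn
            · exact Or.inr ⟨by simp [hv1, hvn], hv2⟩

lemma pyB_loop_eq (rev : PySem.Dict String (List String)) :
    ∀ fuel seen stack, pyB_loop rev fuel seen stack =
      wlLoop (fun seen current rest =>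
        (rev.getD current []).foldl (fun (st : PySem.Set String × List String) name =>
          if PySem.Set.contains st.1 name then st
          else (PySem.Set.add st.1 name, st.2 ++ [name])) (seen, rest)) fuel seen stack := by
  intro fuel
  induction fuel with
  | zero => intro seen stack; rfl
  | succ n ih =>
    intro seen stack
    simp only [pyB_loop, wlLoop]
    cases stack.getLast? with
    | none => rfl
    | some current => exact ih _ _

-- ----- assembly -----

lemma keysK_prop (cs : List (String × List (String × List String))) (sig : String) :
    ((cs.map Prod.fst).dedup.Nodup ∧ (cs.map Prod.fst).dedup.length ≤ cs.length) ∧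
      ∀ c v, EdgeP sig cs c v → v ∈ (cs.map Prod.fst).dedup := by
  refine ⟨⟨List.nodup_dedup _, ?_⟩, ?_⟩
  · calc (cs.map Prod.fst).dedup.length ≤ (cs.map Prod.fst).length :=
          (List.dedup_sublist _).length_le
      _ = cs.length := List.length_map _
  · rintro c v ⟨_, p, hp, rfl, _⟩
    exact List.mem_dedup.mpr (List.mem_map_of_mem hp)

lemma init_ok (cs : List (String × List (String × List String))) (sig : String) :
    (([] : List String)).Nodup ∧
      ([sig] : List String).length +
        (((cs.map Prod.fst).dedup).filter (fun k => decide (k ∉ ([] : List String)))).length ≤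
        cs.length + 1 := by
  refine ⟨List.nodup_nil, ?_⟩
  have h1 : (((cs.map Prod.fst).dedup).filter (fun k => decide (k ∉ ([] : List String)))) =
      (cs.map Prod.fst).dedup := by
    apply List.filter_eq_self.mpr
    intro a _
    simp
  rw [h1]
  have := (keysK_prop cs sig).1.2
  simp only [List.length_singleton]
  omega

lemma resultA_char (sig : String) (cs : List (String × List (String × List String))) :
    (pyA_loop sig cs (cs.length + 1) PySem.Set.empty [sig]).Nodup ∧
      ∀ v, v ∈ pyA_loop sig cs (cs.length + 1) PySem.Set.empty [sig] ↔
        ReachR sig (EdgeP sig cs) v := by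
  simp only [show (PySem.Set.empty : PySem.Set String) = [] from rfl]
  obtain ⟨⟨hK, _⟩, hEK⟩ := keysK_prop cs sig
  obtain ⟨hnd0, hbud0⟩ := init_ok cs sig
  have h := wl_master sig (EdgeP sig cs) (cs.map Prod.fst).dedup hK hEK
    (fun deps current rest => pyA_scan sig current cs (deps, rest))
    (by
      intro deps current rest hnd
      obtain ⟨add, h1, h2, h3⟩ := scanA_spec sig current cs deps rest hnd
      exact ⟨add, h1, h2, h3⟩)
    (cs.length + 1) [] [sig] hnd0 hbud0
    (by intro v hv; cases hv)
    (by intro c hc; exact Or.inl (List.mem_singleton.mp hc))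
    (by
      intro c v _ hc hcf
      rcases hc with rfl | hc
      · exact absurd (List.mem_singleton_self _) hcf
      · cases hc)
  rw [pyA_loop_eq]
  refine ⟨h.1, fun v => ?_⟩
  rw [(h.2 v)]
  simp

lemma resultB_char (sig : String) (cs : List (String × List (String × List String))) :
    (pyB_loop (pyB_rev sig cs) (cs.length + 1) PySem.Set.empty [sig]).Nodup ∧
      ∀ v, v ∈ pyB_loop (pyB_rev sig cs) (cs.length + 1) PySem.Set.empty [sig] ↔
        ReachR sig (EdgeP sig cs) v := by
  simp only [show (PySem.Set.empty : PySem.Set String) = [] from rfl]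
  obtain ⟨⟨hK, _⟩, hEK⟩ := keysK_prop cs sig
  obtain ⟨hnd0, hbud0⟩ := init_ok cs sig
  have h := wl_master sig (EdgeP sig cs) (cs.map Prod.fst).dedup hK hEK
    (fun seen current rest =>
      ((pyB_rev sig cs).getD current []).foldl (fun (st : PySem.Set String × List String) name =>
        if PySem.Set.contains st.1 name then st
        else (PySem.Set.add st.1 name, st.2 ++ [name])) (seen, rest))
    (by
      intro seen current rest hnd
      obtain ⟨add, h1, h2, h3⟩ := scanB_spec ((pyB_rev sig cs).getD current []) seen rest hnd
      refine ⟨add, h1, h2, fun v => ?_⟩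
      rw [h3 v, revB_getD_mem sig cs current v])
    (cs.length + 1) [] [sig] hnd0 hbud0
    (by intro v hv; cases hv)
    (by intro c hc; exact Or.inl (List.mem_singleton.mp hc))
    (by
      intro c v _ hc hcf
      rcases hc with rfl | hc
      · exact absurd (List.mem_singleton_self _) hcf
      · cases hc)
  rw [pyB_loop_eq]
  refine ⟨h.1, fun v => ?_⟩
  rw [(h.2 v)]
  simp

-- ===== VERDICT (by name: the statement is the Claim_ definition above) =====
theorem dependent_signals_py_spec : Claim_equal_dependent_signals_py := by
  intro sig cs _
  unfold Spec_dependent_signals_py dependent_signals_py dependent_signals_py_alt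
  obtain ⟨hA1, hA2⟩ := resultA_char sig cs
  obtain ⟨hB1, hB2⟩ := resultB_char sig cs
  exact PySem.List.sorted_eq_sorted_of_perm _ _ _ (fun a b h => h)
    ((List.perm_ext_iff_of_nodup hA1 hB1).mpr (fun v => (hA2 v).trans (hB2 v).symm))
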